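-- pv_equiv track=rewrite | github.com/sohailshaukat/HackerEarth-competition-solutions | Compiler-Version/code.py | text_parser
-- ===== SOURCE A (Python) =====
-- def text_parser(text):
--     comment_flag = False
--     position = 0
--     while comment_flag != True and position < len(text)-1:
--         if text[position]=='-' and text[position + 1]=='>':
--             text = list(text)
--             text[position] = '.'
--             del text[position + 1]
--             text = ''.join(text)
--         if text[position]=='/' and text[position + 1]=='/':
--             comment_flag = True
--         position += 1
--     return text
-- ===== SOURCE B (Python) =====
-- def text_parser(text):
--     idx = text.find('//')
--     if idx == -1:
--         return text.replace('->', '.')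
--     return text[:idx].replace('->', '.') + text[idx:]
-- ===== Notes on version B (the rewrite author's own statement) =====
-- stated objective: simpler
-- what changed: A's single fused scan that mutates the string in place (rebuilding the whole string on every arrow hit) is replaced by locating the first comment marker with str.find and doing one bulk str.replace on the prefix before it, leaving the suffix untouched.
import Mathlib
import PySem

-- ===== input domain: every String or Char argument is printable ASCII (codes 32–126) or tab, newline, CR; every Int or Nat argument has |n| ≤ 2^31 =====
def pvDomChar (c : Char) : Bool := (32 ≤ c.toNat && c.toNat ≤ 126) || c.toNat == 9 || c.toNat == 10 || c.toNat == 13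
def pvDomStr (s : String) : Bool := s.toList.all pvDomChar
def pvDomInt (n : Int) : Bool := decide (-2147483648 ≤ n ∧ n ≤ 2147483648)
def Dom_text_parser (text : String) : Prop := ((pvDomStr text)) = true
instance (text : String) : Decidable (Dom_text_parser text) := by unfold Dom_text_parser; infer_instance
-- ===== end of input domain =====

-- B replaces A's fused in-place mutating scan by a locate-the-'//'-boundary pass plus one
-- bulk '->'→'.' replacement of the prefix (objective: simpler decomposition).

-- ===== PORT A =====
-- A's while loop: state = (current string, position); comment_flag=true makes the next loop
-- test fail, so setting the flag and returning the current string are the same.  The Python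
-- indexings text[position]/text[position+1] are guarded by position < len(text)-1 and by
-- `and` short-circuiting; getD here reads exactly the indices Python reads (the default is
-- only produced where Python's short-circuit skips the read, and then the test is false in
-- both, since ' ' is not '/').
def text_parser_go (text : List Char) (pos : Nat) : List Char :=
  if h : pos + 1 < text.length then
    let t1 := if text.getD pos ' ' = '-' ∧ text.getD (pos + 1) ' ' = '>'
              then text.take pos ++ '.' :: text.drop (pos + 2) else text
    if t1.getD pos ' ' = '/' ∧ t1.getD (pos + 1) ' ' = '/'
    then t1
    else text_parser_go t1 (pos + 1)
  else text
termination_by text.length - pos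
decreasing_by
  split
  · have : (text.take pos ++ '.' :: text.drop (pos + 2)).length = text.length - 1 := by
      simp [List.length_append]; omega
    omega
  · omega

def text_parser (text : String) : String := String.ofList (text_parser_go text.toList 0)

-- ===== PORT B =====
-- Source B's library calls ported by hand, exactly: str.find('//') = index of the first
-- occurrence of "//" (none = -1), str.replace('->','.') = left-to-right non-overlapping.
def pvRepArrow : List Char → List Char
  | a :: b :: r => if a = '-' ∧ b = '>' then '.' :: pvRepArrow r else a :: pvRepArrow (b :: r)
  | l => l

def pvFindSlash : List Char → Option Nat
  | a :: r => if a = '/' ∧ r.headD ' ' = '/' then some 0 else (pvFindSlash r).map (· + 1)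
  | [] => none

def text_parser_alt (text : String) : String :=
  match pvFindSlash text.toList with
  | none => String.ofList (pvRepArrow text.toList)
  | some i => String.ofList (pvRepArrow (text.toList.take i) ++ text.toList.drop i)

-- ===== PRECONDITION & SPEC =====
def Spec_text_parser (text : String) (out : String) : Prop := out = text_parser_alt text
instance (text : String) (out : String) : Decidable (Spec_text_parser text out) := by unfold Spec_text_parser; infer_instance

-- ===== CLAIM (what is proved, stated in full; the proofs are below) =====
def Claim_equal_text_parser : Prop := ∀ (text : String), Dom_text_parser text → Spec_text_parser text (text_parser text)

-- ===== LEMMAS AND PROOFS =====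

-- the value A's loop computes on the unscanned suffix, in functional form
def pvF : List Char → List Char
  | a :: b :: r =>
    if a = '-' ∧ b = '>' then '.' :: pvF r
    else if a = '/' ∧ b = '/' then a :: b :: r
    else a :: pvF (b :: r)
  | l => l

theorem pvGetD_append (done l : List Char) (k : Nat) (d : Char) :
    (done ++ l).getD (done.length + k) d = l.getD k d := by
  induction done with
  | nil => simp
  | cons c t ih => simpa [Nat.succ_add] using ih

theorem text_parser_go_spec (rest done : List Char) :
    text_parser_go (done ++ rest) done.length = done ++ pvF rest := by
  induction rest using pvF.induct generalizing done with
  | case1 a b r h ih =>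
    obtain ⟨ha, hb⟩ := h
    subst ha hb
    rw [text_parser_go]
    have hget0 : (done ++ '-' :: '>' :: r).getD done.length ' ' = '-' := by
      simpa using pvGetD_append done ('-' :: '>' :: r) 0 ' '
    have hget1 : (done ++ '-' :: '>' :: r).getD (done.length + 1) ' ' = '>' := by
      simpa using pvGetD_append done ('-' :: '>' :: r) 1 ' '
    have hlen : done.length + 1 < (done ++ '-' :: '>' :: r).length := by
      simp [List.length_append]
    have htake : (done ++ '-' :: '>' :: r).take done.length = done := by
      simpa using List.take_left done ('-' :: '>' :: r)
    have hdrop : (done ++ '-' :: '>' :: r).drop (done.length + 2) = r := by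
      rw [show done ++ '-' :: '>' :: r = (done ++ ['-', '>']) ++ r by simp,
          show done.length + 2 = (done ++ ['-', '>']).length by simp]
      exact List.drop_left
    simp only [hlen, dif_pos, hget0, hget1, and_self, if_pos, htake, hdrop]
    have hdot : (done ++ '.' :: r).getD done.length ' ' = '.' := by
      simpa using pvGetD_append done ('.' :: r) 0 ' '
    rw [hdot]
    simp only [show ¬('.' = '/' ∧ (done ++ '.' :: r).getD (done.length + 1) ' ' = '/') by
      rintro ⟨h, -⟩; exact absurd h (by decide), if_neg, not_false_iff]
    have := ih (done ++ ['.'])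
    simpa [pvF, List.append_assoc] using this
  | case2 a b r h1 h2 =>
    obtain ⟨ha, hb⟩ := h2
    subst ha hb
    rw [text_parser_go]
    have hget0 : (done ++ '/' :: '/' :: r).getD done.length ' ' = '/' := by
      simpa using pvGetD_append done ('/' :: '/' :: r) 0 ' '
    have hget1 : (done ++ '/' :: '/' :: r).getD (done.length + 1) ' ' = '/' := by
      simpa using pvGetD_append done ('/' :: '/' :: r) 1 ' '
    have hlen : done.length + 1 < (done ++ '/' :: '/' :: r).length := by
      simp [List.length_append]
    simp only [hlen, dif_pos, hget0, hget1]
    rw [if_neg (by decide : ¬('/' = '-' ∧ '/' = '>')), hget0, hget1,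
        if_pos ⟨rfl, rfl⟩]
    rw [pvF, if_neg (by decide), if_pos ⟨rfl, rfl⟩]
  | case3 a b r h1 h2 ih =>
    rw [text_parser_go]
    have hget0 : (done ++ a :: b :: r).getD done.length ' ' = a := by
      simpa using pvGetD_append done (a :: b :: r) 0 ' '
    have hget1 : (done ++ a :: b :: r).getD (done.length + 1) ' ' = b := by
      simpa using pvGetD_append done (a :: b :: r) 1 ' '
    have hlen : done.length + 1 < (done ++ a :: b :: r).length := by
      simp [List.length_append]
    simp only [hlen, dif_pos, hget0, hget1]
    rw [if_neg h1, hget0, hget1, if_neg h2]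
    have := ih (done ++ [a])
    simp only [pvF, if_neg h1, if_neg h2]
    simpa [List.append_assoc] using this
  | case4 l h =>
    cases l with
    | nil => rw [text_parser_go]; simp [pvF]
    | cons c t =>
      cases t with
      | nil => rw [text_parser_go]; simp [pvF]
      | cons d t2 => exact absurd rfl (h c d t2)

theorem pvRepArrow_cons (a : Char) (l : List Char) (h : ¬(a = '-' ∧ l.headD ' ' = '>')) :
    pvRepArrow (a :: l) = a :: pvRepArrow l := by
  cases l with
  | nil => rfl
  | cons b r => rw [pvRepArrow, if_neg (by simpa using h)]

theorem pvF_eq_alt (l : List Char) :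
    pvF l = (match pvFindSlash l with
             | none => pvRepArrow l
             | some i => pvRepArrow (l.take i) ++ l.drop i) := by
  induction l using pvF.induct with
  | case1 a b r h ih =>
    obtain ⟨ha, hb⟩ := h; subst ha hb
    rw [pvF, if_pos ⟨rfl, rfl⟩]
    rw [pvFindSlash, if_neg (by rintro ⟨h, -⟩; exact absurd h (by decide))]
    rw [pvFindSlash, if_neg (by rintro ⟨h, -⟩; exact absurd h (by decide))]
    cases hfs : pvFindSlash r with
    | none =>
      simp only [hfs, Option.map_none] at ih ⊢
      rw [pvRepArrow, if_pos ⟨rfl, rfl⟩, ih]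
    | some i =>
      simp only [hfs, Option.map_some] at ih ⊢
      rw [List.take_succ_cons, List.take_succ_cons, List.drop_succ_cons, List.drop_succ_cons,
          pvRepArrow, if_pos ⟨rfl, rfl⟩, ih]
      simp
  | case2 a b r h1 h2 =>
    obtain ⟨ha, hb⟩ := h2; subst ha hb
    rw [pvF, if_neg h1, if_pos ⟨rfl, rfl⟩]
    rw [pvFindSlash, if_pos ⟨rfl, rfl⟩]
    simp [pvRepArrow]
  | case3 a b r h1 h2 ih =>
    rw [pvF, if_neg h1, if_neg h2]
    rw [pvFindSlash, if_neg (by simpa using h2)]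
    cases hfs : pvFindSlash (b :: r) with
    | none =>
      simp only [hfs, Option.map_none] at ih ⊢
      rw [ih, pvRepArrow_cons a (b :: r) (by simpa using h1)]
    | some i =>
      simp only [hfs, Option.map_some] at ih ⊢
      rw [List.take_succ_cons, List.drop_succ_cons, ih]
      have hx : ¬(a = '-' ∧ (List.take i (b :: r)).headD ' ' = '>') := by
        rintro ⟨ha, hh⟩
        cases i with
        | zero => simp at hh
        | succ j => exact h1 ⟨ha, by simpa using hh⟩
      rw [pvRepArrow_cons a _ hx]
      simp
  | case4 l h =>
    cases l with
    | nil => rfl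
    | cons c t =>
      cases t with
      | nil =>
        rw [pvFindSlash, if_neg (by rintro ⟨-, hh⟩; exact absurd hh (by decide))]
        simp [pvF, pvFindSlash, pvRepArrow]
      | cons d t2 => exact absurd rfl (h c d t2)

-- ===== VERDICT (by name: the statement is the Claim_ definition above) =====
theorem text_parser_spec : Claim_equal_text_parser := by
  intro text _
  unfold Spec_text_parser text_parser text_parser_alt
  have h0 : text_parser_go text.toList 0 = pvF text.toList := by
    simpa using text_parser_go_spec text.toList []
  rw [h0, pvF_eq_alt]
  cases pvFindSlash text.toList <;> rfl
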